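-- pv_equiv track=rewrite | github.com/Beegie01/Some-useful-functions | ds_funcs.py | classify_age
-- ===== SOURCE A (Python) =====
-- def classify_age(row):
--     age_guide = {(0, 9): '0 to 9', (10, 19): '10 to 19',
--                  (20, 29): '20 to 29', (30, 39): '30 to 39',
--                  (40, 49): '40 to 49', (50, 59): '50 to 59',
--                  (60, 69): '60 to 69', (70, 79): '70 to 79',
--                  (80, 89): '80 to 89'}
--
--     for bracket, age_cls in age_guide.items():
--         if (row >= bracket[0]) and (row <= bracket[1]):
--             return age_cls
-- ===== SOURCE B (Python) =====
-- def classify_age(row):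
--     if 0 <= row <= 89:
--         d = (row // 10) * 10
--         return f"{d} to {d + 9}"
--     return None
-- ===== Notes on version B (the rewrite author's own statement) =====
-- stated objective: simpler
-- what changed: Replaced the nine-entry bracket table scan with a closed-form arithmetic computation: floor the age to its decade with (row // 10) * 10 and format the label directly.
import Mathlib
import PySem

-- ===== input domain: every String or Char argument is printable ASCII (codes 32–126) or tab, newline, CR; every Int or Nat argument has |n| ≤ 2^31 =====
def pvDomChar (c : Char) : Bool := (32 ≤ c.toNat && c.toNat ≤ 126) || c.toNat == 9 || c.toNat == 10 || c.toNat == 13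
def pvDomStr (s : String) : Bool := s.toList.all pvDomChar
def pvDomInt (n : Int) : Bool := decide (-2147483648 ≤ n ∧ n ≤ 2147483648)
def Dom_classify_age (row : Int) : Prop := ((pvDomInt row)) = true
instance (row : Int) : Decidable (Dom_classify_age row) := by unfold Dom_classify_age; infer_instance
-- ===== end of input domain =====

-- ===== PORT A =====
-- Header: B replaces A's nine-entry bracket table scan with a closed-form decade computation (simpler).
-- A-side helper: the table scan with early return
def classifyGoA : List (Int × Int × String) → Int → Option String
  | [], _ => none
  | (lo, hi, s) :: rest, row =>
      if row ≥ lo ∧ row ≤ hi then some s else classifyGoA rest row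

def classify_age (row : Int) : Option String :=
  classifyGoA
    [(0, 9, "0 to 9"), (10, 19, "10 to 19"), (20, 29, "20 to 29"),
     (30, 39, "30 to 39"), (40, 49, "40 to 49"), (50, 59, "50 to 59"),
     (60, 69, "60 to 69"), (70, 79, "70 to 79"), (80, 89, "80 to 89")] row

-- ===== PORT B =====
def classify_age_alt (row : Int) : Option String :=
  if 0 ≤ row ∧ row ≤ 89 then
    let d := PySem.Int.floordiv row 10 * 10
    some (PySem.Int.toStr d ++ " to " ++ PySem.Int.toStr (d + 9))
  else none

-- ===== PRECONDITION & SPEC =====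
def Spec_classify_age (row : Int) (out : Option String) : Prop := out = classify_age_alt row
instance (row : Int) (out : Option String) : Decidable (Spec_classify_age row out) := by unfold Spec_classify_age; infer_instance

-- ===== CLAIM (what is proved, stated in full; the proofs are below) =====
def Claim_equal_classify_age : Prop := ∀ (row : Int), Dom_classify_age row → Spec_classify_age row (classify_age row)

-- ===== LEMMAS AND PROOFS =====

-- ===== VERDICT (by name: the statement is the Claim_ definition above) =====
theorem classify_age_spec : Claim_equal_classify_age := by
  intro row _
  unfold Spec_classify_age
  by_cases h : 0 ≤ row ∧ row ≤ 89
  · obtain ⟨h1, h2⟩ := h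
    interval_cases row <;> decide
  · simp only [classify_age, classify_age_alt, classifyGoA]
    split_ifs <;> first | rfl | omega
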